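-- pv_equiv track=rewrite | github.com/qaqjx/taotie-vllm | exp/request_rate/run_full_benchmark.py | extract_unique_contexts
-- ===== SOURCE A (Python) =====
-- from typing import Dict, List, Sequence, Tuple
--
-- def extract_unique_contexts(samples: List[dict], limit: int) -> List[str]:
--     """Extract unique contexts from dataset, up to limit."""
--     contexts = []
--     seen = set()
--     for sample in samples:
--         for ctx in sample.get("contexts", []):
--             if ctx not in seen:
--                 seen.add(ctx)
--                 contexts.append(ctx)
--                 if len(contexts) >= limit:
--                     return contexts
--     return contexts
-- ===== SOURCE B (Python) =====
-- def extract_unique_contexts(samples, limit):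
--     """Two-phase rewrite: fully dedupe first (dict.fromkeys, order-preserving),
--     then emit up to the limit with an append-then-check loop."""
--     unique = dict.fromkeys(ctx for s in samples for ctx in s.get("contexts", []))
--     result = []
--     for ctx in unique:
--         result.append(ctx)
--         if len(result) >= limit:
--             break
--     return result
-- ===== Notes on version B (the rewrite author's own statement) =====
-- stated objective: simpler
-- what changed: Replaces the nested loop with inline seen-set bookkeeping and early return by two flat phases: one order-preserving full dedup via dict.fromkeys over a flattened generator, then a separate short loop that emits results until the limit is reached.
import Mathlib
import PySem

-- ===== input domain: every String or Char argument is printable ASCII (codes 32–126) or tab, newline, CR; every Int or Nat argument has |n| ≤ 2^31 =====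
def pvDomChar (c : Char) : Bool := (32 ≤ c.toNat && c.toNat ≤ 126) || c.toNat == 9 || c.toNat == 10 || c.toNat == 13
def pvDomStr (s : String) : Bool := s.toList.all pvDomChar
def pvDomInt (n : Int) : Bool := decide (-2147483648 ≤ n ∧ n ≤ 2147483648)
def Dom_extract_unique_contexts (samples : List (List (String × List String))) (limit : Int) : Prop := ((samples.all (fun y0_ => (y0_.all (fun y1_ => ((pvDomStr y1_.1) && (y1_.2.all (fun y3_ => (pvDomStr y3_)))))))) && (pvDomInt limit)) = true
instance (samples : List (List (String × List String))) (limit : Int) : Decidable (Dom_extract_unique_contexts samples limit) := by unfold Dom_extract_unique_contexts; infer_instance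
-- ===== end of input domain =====

-- B computes the full ordered dedup first and then cuts at the limit in a second pass,
-- instead of A's nested loop with an inline seen-set and early return; same cost, simpler shape.

-- ===== PORT A =====
-- inner 'for ctx in sample.get("contexts", [])' loop; .inr = early 'return contexts'
def pvAInner (limit : Int) : List String → List String → PySem.Set String → (List String × PySem.Set String) ⊕ List String
  | [], contexts, seen => .inl (contexts, seen)
  | c :: rest, contexts, seen =>
    if ¬ PySem.Set.contains seen c then
      let seen' := PySem.Set.add seen c
      let contexts' := contexts ++ [c]
      if limit ≤ (contexts'.length : Int) then .inr contexts'
      else pvAInner limit rest contexts' seen'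
    else pvAInner limit rest contexts seen

-- outer 'for sample in samples' loop
def pvAOuter (limit : Int) : List (List (String × List String)) → List String → PySem.Set String → List String
  | [], contexts, _ => contexts
  | s :: rest, contexts, seen =>
    match pvAInner limit ((PySem.Dict.mk s).getD "contexts" []) contexts seen with
    | .inl (contexts', seen') => pvAOuter limit rest contexts' seen'
    | .inr r => r

def extract_unique_contexts (samples : List (List (String × List String))) (limit : Int) : List String :=
  pvAOuter limit samples [] PySem.Set.empty

-- ===== PORT B =====
-- 'for ctx in unique: result.append(ctx); if len(result) >= limit: break'
def pvBLoop (limit : Int) : List String → List String → List String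
  | [], result => result
  | c :: rest, result =>
    let result' := result ++ [c]
    if limit ≤ (result'.length : Int) then result' else pvBLoop limit rest result'

def extract_unique_contexts_alt (samples : List (List (String × List String))) (limit : Int) : List String :=
  let unique := PySem.List.dedup (samples.flatMap (fun s => (PySem.Dict.mk s).getD "contexts" []))
  pvBLoop limit unique []

-- ===== PRECONDITION & SPEC =====
def Spec_extract_unique_contexts (samples : List (List (String × List String))) (limit : Int) (out : List String) : Prop := out = extract_unique_contexts_alt samples limit
instance (samples : List (List (String × List String))) (limit : Int) (out : List String) : Decidable (Spec_extract_unique_contexts samples limit out) := by unfold Spec_extract_unique_contexts; infer_instance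

-- ===== CLAIM (what is proved, stated in full; the proofs are below) =====
def Claim_equal_extract_unique_contexts : Prop := ∀ (samples : List (List (String × List String))) (limit : Int), Dom_extract_unique_contexts samples limit → Spec_extract_unique_contexts samples limit (extract_unique_contexts samples limit)

-- ===== LEMMAS AND PROOFS =====

-- ===== VERDICT (by name: the statement is the Claim_ definition above) =====
-- one-pass dedup-with-limit over a single flattened list: bridge between the two ports
def pvProc (limit : Int) : List String → List String → PySem.Set String → List String
  | [], contexts, _ => contexts
  | c :: rest, contexts, seen =>
    if ¬ PySem.Set.contains seen c then
      let contexts' := contexts ++ [c]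
      if limit ≤ (contexts'.length : Int) then contexts'
      else pvProc limit rest contexts' (PySem.Set.add seen c)
    else pvProc limit rest contexts seen

-- the elements of xs that are new w.r.t. seen, first occurrences, in order
def pvDedupFrom (seen : PySem.Set String) : List String → List String
  | [] => []
  | c :: rest =>
    if PySem.Set.contains seen c then pvDedupFrom seen rest
    else c :: pvDedupFrom (PySem.Set.add seen c) rest

theorem pvProc_append (limit : Int) (xs : List String) :
    ∀ (ys contexts : List String) (seen : PySem.Set String),
    pvProc limit (xs ++ ys) contexts seen =
      match pvAInner limit xs contexts seen with
      | .inl (c, s) => pvProc limit ys c s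
      | .inr r => r := by
  induction xs with
  | nil => intro ys contexts seen; simp [pvAInner]
  | cons c rest ih =>
    intro ys contexts seen
    simp only [List.cons_append, pvProc, pvAInner]
    by_cases h : c ∈ seen
    · simp [h, ih]
    · by_cases hl : limit ≤ (contexts.length : Int) + 1
      · simp [h, hl]
      · simp [h, hl, ih]

theorem pvAOuter_eq_proc (limit : Int) (samples : List (List (String × List String))) :
    ∀ (contexts : List String) (seen : PySem.Set String),
    pvAOuter limit samples contexts seen =
      pvProc limit (samples.flatMap (fun s => (PySem.Dict.mk s).getD "contexts" [])) contexts seen := by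
  induction samples with
  | nil => intro contexts seen; simp [pvAOuter, pvProc]
  | cons s rest ih =>
    intro contexts seen
    rw [List.flatMap_cons, pvProc_append, pvAOuter]
    cases h : pvAInner limit ((PySem.Dict.mk s).getD "contexts" []) contexts seen with
    | inl p => cases p with | mk c se => simp [ih]
    | inr r => simp

theorem pvProc_eq_bloop (limit : Int) (xs : List String) :
    ∀ (contexts : List String) (seen : PySem.Set String),
    pvProc limit xs contexts seen = pvBLoop limit (pvDedupFrom seen xs) contexts := by
  induction xs with
  | nil => intro contexts seen; simp [pvProc, pvDedupFrom, pvBLoop]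
  | cons c rest ih =>
    intro contexts seen
    simp only [pvProc, pvDedupFrom]
    by_cases h : c ∈ seen
    · simp [h, ih]
    · by_cases hl : limit ≤ (contexts.length : Int) + 1
      · simp [h, hl, pvBLoop]
      · simp [h, hl, ih, pvBLoop]

theorem pvDedupFrom_foldl (xs : List String) :
    ∀ (seen : PySem.Set String),
    seen ++ pvDedupFrom seen xs = xs.foldl PySem.Set.add seen := by
  induction xs with
  | nil => intro seen; simp [pvDedupFrom]
  | cons c rest ih =>
    intro seen
    simp only [pvDedupFrom, List.foldl_cons]
    by_cases h : c ∈ seen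
    · have ha : PySem.Set.add seen c = seen := by simp [PySem.Set.add, h]
      simp [h, ih]
    · have ha : PySem.Set.add seen c = seen ++ [c] := by simp [PySem.Set.add, h]
      rw [ha, ← ih (seen ++ [c])]
      simp [h]

theorem pvDedupFrom_empty (xs : List String) :
    pvDedupFrom PySem.Set.empty xs = PySem.List.dedup xs := by
  have h := pvDedupFrom_foldl xs PySem.Set.empty
  simpa [PySem.Set.empty, PySem.List.dedup_eq_ofList, PySem.Set.ofList_eq_foldl] using h

theorem extract_unique_contexts_spec : Claim_equal_extract_unique_contexts := by
  intro samples limit _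
  unfold Spec_extract_unique_contexts extract_unique_contexts extract_unique_contexts_alt
  rw [pvAOuter_eq_proc, pvProc_eq_bloop, pvDedupFrom_empty]
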